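-- pv_equiv track=rewrite | github.com/Coupechoux/adrar | Algo/Formes python/formes_solutions.py | emptyRectangle
-- ===== SOURCE A (Python) =====
-- def fullLine(n,c):
-- 	s = ""
-- 	for i in range(n):
-- 		s += c
-- 	return s
--
-- def emptyLine(n,c1,c2):
-- 	s = c1
-- 	for i in range(n-2):
-- 		s += c2
-- 	if n>1:
-- 		s += c1
-- 	return s
--
-- def emptyRectangle(largeur, hauteur, c1, c2):
-- 	s = fullLine(largeur,c1)
-- 	s += "\n"
-- 	for i in range(hauteur-2):
-- 		s += emptyLine(largeur,c1,c2)
-- 		s += "\n"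
-- 	if hauteur > 1:
-- 		s += fullLine(largeur,c1)
-- 		s += "\n"
-- 	return s
-- ===== SOURCE B (Python) =====
-- def emptyRectangle(largeur, hauteur, c1, c2):
--     top = c1 * largeur
--     mid = c1 + c2 * (largeur - 2) + (c1 if largeur > 1 else "")
--     rows = [top] + [mid] * (hauteur - 2) + ([top] if hauteur > 1 else [])
--     return "".join(r + "\n" for r in rows)
-- ===== Notes on version B (the rewrite author's own statement) =====
-- stated objective: simpler
-- what changed: Replaced the three character/row append loops and both helpers with closed-form line construction: string repetition builds each line and the rectangle is the join of an assembled row list.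
import Mathlib
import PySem

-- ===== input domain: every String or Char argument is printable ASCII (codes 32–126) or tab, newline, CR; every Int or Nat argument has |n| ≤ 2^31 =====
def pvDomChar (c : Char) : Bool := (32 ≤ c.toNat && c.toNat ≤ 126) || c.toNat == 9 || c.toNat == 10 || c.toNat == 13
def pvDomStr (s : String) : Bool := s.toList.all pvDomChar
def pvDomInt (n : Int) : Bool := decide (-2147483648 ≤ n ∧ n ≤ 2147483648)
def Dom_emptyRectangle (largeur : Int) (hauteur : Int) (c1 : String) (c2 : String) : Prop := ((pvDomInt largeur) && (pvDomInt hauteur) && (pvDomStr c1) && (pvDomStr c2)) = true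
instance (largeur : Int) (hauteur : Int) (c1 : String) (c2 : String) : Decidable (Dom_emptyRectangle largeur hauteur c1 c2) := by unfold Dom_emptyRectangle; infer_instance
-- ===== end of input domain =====

-- B replaces A's per-character append loops by closed-form line construction
-- (string repetition and row assembly); objective: simpler. A is total; no Pre_.

-- ===== PORT A =====
-- s = ""; for i in range(n): s += c
def pvFullLine (n : Int) (c : String) : String :=
  (PySem.List.pyRange 0 n 1).foldl (fun s _ => s ++ c) ""

-- s = c1; for i in range(n-2): s += c2; if n>1: s += c1
def pvEmptyLine (n : Int) (c1 : String) (c2 : String) : String :=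
  let s := (PySem.List.pyRange 0 (n - 2) 1).foldl (fun s _ => s ++ c2) c1
  if n > 1 then s ++ c1 else s

def emptyRectangle (largeur : Int) (hauteur : Int) (c1 : String) (c2 : String) : String :=
  let s := pvFullLine largeur c1 ++ "\n"
  let s := (PySem.List.pyRange 0 (hauteur - 2) 1).foldl
            (fun s _ => s ++ pvEmptyLine largeur c1 c2 ++ "\n") s
  if hauteur > 1 then s ++ pvFullLine largeur c1 ++ "\n" else s

-- ===== PORT B =====
-- Python's  s * k  on strings (empty for k ≤ 0)
def pvStrRep (s : String) : Nat → String
  | 0 => ""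
  | n + 1 => s ++ pvStrRep s n

def pvStrMul (s : String) (k : Int) : String := pvStrRep s k.toNat

def emptyRectangle_alt (largeur : Int) (hauteur : Int) (c1 : String) (c2 : String) : String :=
  let top := pvStrMul c1 largeur
  let mid := c1 ++ pvStrMul c2 (largeur - 2) ++ (if largeur > 1 then c1 else "")
  let rows := [top] ++ List.replicate (hauteur - 2).toNat mid
                ++ (if hauteur > 1 then [top] else [])
  -- "".join(r + "\n" for r in rows)
  (rows.map (fun r => r ++ "\n")).foldl (fun acc r => acc ++ r) ""

-- ===== PRECONDITION & SPEC =====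
def Spec_emptyRectangle (largeur : Int) (hauteur : Int) (c1 : String) (c2 : String) (out : String) : Prop := out = emptyRectangle_alt largeur hauteur c1 c2
instance (largeur : Int) (hauteur : Int) (c1 : String) (c2 : String) (out : String) : Decidable (Spec_emptyRectangle largeur hauteur c1 c2 out) := by unfold Spec_emptyRectangle; infer_instance

-- ===== CLAIM (what is proved, stated in full; the proofs are below) =====
def Claim_equal_emptyRectangle : Prop := ∀ (largeur : Int) (hauteur : Int) (c1 : String) (c2 : String), Dom_emptyRectangle largeur hauteur c1 c2 → Spec_emptyRectangle largeur hauteur c1 c2 (emptyRectangle largeur hauteur c1 c2)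

-- ===== LEMMAS AND PROOFS =====

-- a loop that appends the constant string t once per element is a repetition
theorem foldl_append_const (l : List Int) (t a : String) :
    l.foldl (fun s _ => s ++ t) a = a ++ pvStrRep t l.length := by
  induction l generalizing a with
  | nil => simp [pvStrRep]
  | cons x xs ih => simp [List.foldl, ih, pvStrRep, String.append_assoc]

-- a join-style fold over replicated rows is the same repetition
theorem foldl_append_replicate (k : Nat) (t a : String) :
    (List.replicate k t).foldl (fun acc r => acc ++ r) a = a ++ pvStrRep t k := by
  induction k generalizing a with
  | zero => simp [pvStrRep]
  | succ n ih => simp [List.replicate_succ, ih, pvStrRep, String.append_assoc]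

-- the rectangle's middle loop appends u ++ v each iteration
theorem foldl_append_const2 (l : List Int) (u v a : String) :
    l.foldl (fun s _ => s ++ u ++ v) a = a ++ pvStrRep (u ++ v) l.length := by
  have h : (fun (s : String) (_ : Int) => s ++ u ++ v) = fun s _ => s ++ (u ++ v) := by
    funext s x; rw [String.append_assoc]
  rw [h, foldl_append_const]

theorem pvFullLine_eq (n : Int) (c : String) : pvFullLine n c = pvStrMul c n := by
  simp [pvFullLine, pvStrMul, foldl_append_const, PySem.List.length_pyRange_one]

theorem pvEmptyLine_eq (n : Int) (c1 c2 : String) :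
    pvEmptyLine n c1 c2 = c1 ++ pvStrMul c2 (n - 2) ++ (if n > 1 then c1 else "") := by
  simp only [pvEmptyLine, pvStrMul, foldl_append_const, PySem.List.length_pyRange_one]
  split_ifs <;> simp

-- ===== VERDICT (by name: the statement is the Claim_ definition above) =====
theorem emptyRectangle_spec : Claim_equal_emptyRectangle := by
  intro largeur hauteur c1 c2 _
  show _ = _
  simp only [emptyRectangle, emptyRectangle_alt, List.map_append, List.map_replicate,
    List.foldl_append, List.map_cons, List.map_nil, List.foldl_cons, List.foldl_nil,
    foldl_append_replicate, pvFullLine_eq, pvEmptyLine_eq,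
    foldl_append_const2, PySem.List.length_pyRange_one]
  split_ifs <;> simp [String.append_assoc]
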